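-- pv_equiv track=rewrite | github.com/moeinsql/farsicarplatedetection | checkdetectedplate.py | checkplate
-- ===== SOURCE A (Python) =====
-- def checkplate(plate):
--     if len(plate) != 8:
--         return False
--
--     if plate[2].isdigit():
--         return False
--
--     ac=0
--     for i in plate:
--         if not i.isdigit():
--             ac = ac + 1
--     if ac != 1:
--         return False
--
--     return True
-- ===== SOURCE B (Python) =====
-- def checkplate(plate):
--     # template match: every position must be a digit except position 2, which
--     # must be a non-digit; the terminal index test (idx == 8) enforces the
--     # length, so no separate length guard or non-digit count is needed.
--     idx = 0
--     for ch in plate: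
--         if ch.isdigit() != (idx != 2):
--             return False
--         idx += 1
--     return idx == 8
-- ===== Notes on version B (the rewrite author's own statement) =====
-- stated objective: alternative
-- what changed: B drops A's up-front length guard, positional plate[2] check and non-digit counting loop entirely and instead scans the string once against a per-position template (index 2 must be a non-digit, every other index a digit), with the terminal index test idx == 8 enforcing the length.
import Mathlib
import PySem

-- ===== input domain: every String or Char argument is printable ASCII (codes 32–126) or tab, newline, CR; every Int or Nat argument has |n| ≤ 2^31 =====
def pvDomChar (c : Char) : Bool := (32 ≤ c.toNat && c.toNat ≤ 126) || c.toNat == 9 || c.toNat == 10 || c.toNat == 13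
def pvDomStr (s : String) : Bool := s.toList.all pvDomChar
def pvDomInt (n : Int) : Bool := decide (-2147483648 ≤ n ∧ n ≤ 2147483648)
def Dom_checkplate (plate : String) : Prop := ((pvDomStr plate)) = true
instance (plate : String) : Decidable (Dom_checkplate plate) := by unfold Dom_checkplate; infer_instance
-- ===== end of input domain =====

-- B replaces A's length guard + positional plate[2] check + counting loop with a
-- single per-position template-match scan whose terminal index test (idx == 8)
-- enforces the length (objective: alternative decomposition, same cost).

-- ===== PORT A =====
def checkplate (plate : String) : Bool :=
  let cs := plate.toList
  if PySem.Str.len plate ≠ (8 : Int) then false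
  else if PySem.Chars.isdigit (PySem.List.pyGetD cs 2 ' ') then false  -- plate[2]: in range since len = 8
  else
    let ac := cs.foldl (fun ac i => if ¬ PySem.Chars.isdigit i then ac + 1 else ac) (0 : Int)
    if ac ≠ 1 then false else true

-- ===== PORT B =====
def pvGo : List Char → Int → Bool
  | [], idx => idx == 8
  | c :: rest, idx =>
    if PySem.Chars.isdigit c != (idx != 2) then false
    else pvGo rest (idx + 1)

def checkplate_alt (plate : String) : Bool := pvGo plate.toList 0

-- ===== PRECONDITION & SPEC =====
def Spec_checkplate (plate : String) (out : Bool) : Prop := out = checkplate_alt plate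
instance (plate : String) (out : Bool) : Decidable (Spec_checkplate plate out) := by unfold Spec_checkplate; infer_instance

-- ===== CLAIM (what is proved, stated in full; the proofs are below) =====
def Claim_equal_checkplate : Prop := ∀ (plate : String), Dom_checkplate plate → Spec_checkplate plate (checkplate plate)

-- ===== LEMMAS AND PROOFS =====
-- pvGo can only succeed when it consumes exactly up to index 8.
theorem pvGo_len (cs : List Char) (idx : Int) (h : pvGo cs idx = true) :
    idx + cs.length = 8 := by
  induction cs generalizing idx with
  | nil => simp [pvGo] at h; simpa using h
  | cons c rest ih =>
    simp only [pvGo] at h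
    split at h
    · exact absurd h (by simp)
    · have := ih (idx + 1) h
      simp [List.length_cons]; omega

-- A's and B's bodies agree as functions of the character list.
theorem checkplate_list (cs : List Char) :
    (if (cs.length : Int) ≠ 8 then false
     else if PySem.Chars.isdigit (PySem.List.pyGetD cs 2 ' ') then false
     else if cs.foldl (fun ac i => if ¬ PySem.Chars.isdigit i then ac + 1 else ac) (0 : Int) ≠ 1
       then false else true)
    = pvGo cs 0 := by
  by_cases h : cs.length = 8
  · match cs, h with
    | [a,b,c,d,e,f,g,i], _ =>
      by_cases ha : PySem.Chars.isdigit a <;>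
      by_cases hb : PySem.Chars.isdigit b <;>
      by_cases hc : PySem.Chars.isdigit c <;>
      by_cases hd : PySem.Chars.isdigit d <;>
      by_cases he : PySem.Chars.isdigit e <;>
      by_cases hf : PySem.Chars.isdigit f <;>
      by_cases hg : PySem.Chars.isdigit g <;>
      by_cases hi : PySem.Chars.isdigit i <;>
        simp [ha, hb, hc, hd, he, hf, hg, hi, pvGo, PySem.List.pyGetD]
  · have h' : ((cs.length : Int) ≠ 8) := by exact_mod_cast h
    have hg : pvGo cs 0 = false := by
      by_contra hf
      have : pvGo cs 0 = true := by revert hf; cases pvGo cs 0 <;> simp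
      have := pvGo_len cs 0 this
      omega
    simp [h', hg]

-- ===== VERDICT (by name: the statement is the Claim_ definition above) =====
theorem checkplate_spec : Claim_equal_checkplate := by
  intro plate _
  unfold Spec_checkplate checkplate checkplate_alt
  rw [PySem.Str.len_eq]
  exact checkplate_list plate.toList
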